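-- pv_equiv track=rewrite | github.com/miethe/CCDash | backend/routers/features.py | _normalize_link_commands
-- ===== SOURCE A (Python) =====
-- _NON_CONSEQUENTIAL_COMMAND_PREFIXES = {"/clear", "/model"}
--
-- _KEY_WORKFLOW_COMMAND_MARKERS = (
--     "/dev:execute-phase",
--     "/dev:quick-feature",
--     "/plan:plan-feature",
--     "/dev:implement-story",
--     "/dev:complete-user-story",
--     "/fix:debug",
-- )
--
-- def _command_token(command_name: str) -> str:
--     normalized = " ".join((command_name or "").strip().split()).lower()
--     if not normalized:
--         return ""
--     return normalized.split()[0]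
--
-- def _normalize_link_commands(commands: list[str]) -> list[str]:
--     seen: set[str] = set()
--     deduped: list[str] = []
--     for raw in commands:
--         command = " ".join((raw or "").strip().split())
--         if not command:
--             continue
--         token = _command_token(command)
--         if token in _NON_CONSEQUENTIAL_COMMAND_PREFIXES:
--             continue
--         lowered = command.lower()
--         if lowered in seen:
--             continue
--         seen.add(lowered)
--         deduped.append(command)
--     deduped.sort(
--         key=lambda command: (
--             next((idx for idx, marker in enumerate(_KEY_WORKFLOW_COMMAND_MARKERS) if marker in command.lower()), len(_KEY_WORKFLOW_COMMAND_MARKERS)),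
--             command.lower(),
--         )
--     )
--     return deduped
-- ===== SOURCE B (Python) =====
-- _NON_CONSEQUENTIAL_COMMAND_PREFIXES = {"/clear", "/model"}
--
-- _KEY_WORKFLOW_COMMAND_MARKERS = (
--     "/dev:execute-phase",
--     "/dev:quick-feature",
--     "/plan:plan-feature",
--     "/dev:implement-story",
--     "/dev:complete-user-story",
--     "/fix:debug",
-- )
--
--
-- def _command_token(command_name: str) -> str:
--     normalized = " ".join((command_name or "").strip().split()).lower()
--     if not normalized:
--         return ""
--     return normalized.split()[0]
--
--
-- def _clean(raw: str):
--     """Collapse whitespace; None for empty or non-consequential commands."""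
--     command = " ".join((raw or "").strip().split())
--     if not command or _command_token(command) in _NON_CONSEQUENTIAL_COMMAND_PREFIXES:
--         return None
--     return command
--
--
-- def _priority(lowered: str) -> int:
--     for idx, marker in enumerate(_KEY_WORKFLOW_COMMAND_MARKERS):
--         if marker in lowered:
--             return idx
--     return len(_KEY_WORKFLOW_COMMAND_MARKERS)
--
--
-- def _normalize_link_commands(commands: list[str]) -> list[str]:
--     # Single pass, no seen-set and no final sort: alongside the result a parallel
--     # sorted list of (priority, lowercase) keys is maintained; a hand-rolled
--     # binary search locates both duplicates (an identical key, since the priority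
--     # is a function of the lowercase form) and the insertion position, and each
--     # kept command is inserted directly at its final sorted position.
--     result: list[str] = []
--     keys: list = []
--     for raw in commands:
--         command = _clean(raw)
--         if command is None:
--             continue
--         lowered = command.lower()
--         key = (_priority(lowered), lowered)
--         lo, hi = 0, len(keys)
--         while lo < hi:
--             mid = (lo + hi) // 2
--             if keys[mid] < key:
--                 lo = mid + 1
--             else:
--                 hi = mid
--         if lo < len(keys) and keys[lo] == key:
--             continue
--         keys.insert(lo, key)
--         result.insert(lo, command)
--     return result
-- ===== Notes on version B (the rewrite author's own statement) =====
-- stated objective: alternative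
-- what changed: Replaces A's two-stage pipeline (dedup into a list guarded by a seen-set, then one composite-key library sort) by a single pass with no seen-set and no final sort: a parallel sorted list of (workflow-marker priority, lowercase) keys is maintained, a hand-rolled binary search locates both duplicates (an identical key, since the priority is a function of the lowercase form) and the insertion position, and each kept command is inserted directly at its final sorted position; correct because dedup makes all keys distinct.
import Mathlib
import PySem

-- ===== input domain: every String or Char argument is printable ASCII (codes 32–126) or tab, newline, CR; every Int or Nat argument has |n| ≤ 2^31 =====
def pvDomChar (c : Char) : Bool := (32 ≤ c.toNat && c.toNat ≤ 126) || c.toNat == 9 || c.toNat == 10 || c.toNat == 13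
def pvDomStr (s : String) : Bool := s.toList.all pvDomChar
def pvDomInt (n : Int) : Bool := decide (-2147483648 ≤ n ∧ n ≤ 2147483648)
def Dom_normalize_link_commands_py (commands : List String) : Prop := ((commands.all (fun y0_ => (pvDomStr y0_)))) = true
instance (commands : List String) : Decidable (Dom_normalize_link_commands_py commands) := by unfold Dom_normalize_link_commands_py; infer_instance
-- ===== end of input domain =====

-- B replaces A's dedup-then-composite-sort by a single pass that binary-searches a parallel
-- sorted key list for duplicates and inserts each kept command at its final sorted position;
-- return values proved equal.

-- ===== PORT A =====
-- shared module context: _KEY_WORKFLOW_COMMAND_MARKERS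
def pvMarkers : List String :=
  ["/dev:execute-phase", "/dev:quick-feature", "/plan:plan-feature",
   "/dev:implement-story", "/dev:complete-user-story", "/fix:debug"]

-- _command_token (shared module helper used verbatim by both Pythons).
-- 'normalized.split()[0]' is guarded by 'if not normalized'; headD "" is exact there.
def pvToken (command_name : String) : String :=
  let normalized := PySem.Str.lower (PySem.Str.join " " (PySem.Str.split₀ (PySem.Str.strip command_name)))
  if normalized = "" then "" else (PySem.Str.split₀ normalized).headD ""

-- A's dedup/filter loop
def pvDedupLoop : List String → PySem.Set String → List String → List String
  | [], _, deduped => deduped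
  | raw :: rest, seen, deduped =>
    let command := PySem.Str.join " " (PySem.Str.split₀ (PySem.Str.strip raw))
    if command = "" then pvDedupLoop rest seen deduped
    else if PySem.Set.contains (PySem.Set.ofList ["/clear", "/model"]) (pvToken command) then
      pvDedupLoop rest seen deduped
    else
      let lowered := PySem.Str.lower command
      if PySem.Set.contains seen lowered then pvDedupLoop rest seen deduped
      else pvDedupLoop rest (PySem.Set.add seen lowered) (deduped ++ [command])

-- next((idx for idx, marker in enumerate(markers) if marker in lowered), len(markers))
def pvPrio (lowered : String) : Nat :=
  (pvMarkers.findIdx? (fun marker => PySem.Str.isIn marker lowered)).getD 6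

def normalize_link_commands_py (commands : List String) : List String :=
  let deduped := pvDedupLoop commands PySem.Set.empty []
  PySem.List.sorted2 deduped (fun command => pvPrio (PySem.Str.lower command))
    (fun command => PySem.Str.lower command)

-- ===== PORT B =====
-- _clean: whitespace collapse, None for empty / non-consequential commands
def pvClean (raw : String) : Option String :=
  let command := PySem.Str.join " " (PySem.Str.split₀ (PySem.Str.strip raw))
  if command = "" || PySem.Set.contains (PySem.Set.ofList ["/clear", "/model"]) (pvToken command) then
    none
  else some command

-- _priority: B's explicit for-loop over enumerate(markers), as a recursion carrying the index
def pvPrioB : List String → Nat → String → Nat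
  | [], _, _ => 6
  | m :: ms, idx, lowered =>
    if PySem.Str.isIn m lowered then idx else pvPrioB ms (idx + 1) lowered

-- Python's lexicographic tuple comparison (p, s) < (q, t)
def pvTupLt (a b : Nat × String) : Bool :=
  decide (a.1 < b.1) || (a.1 == b.1 && decide (a.2 < b.2))

-- the hand-rolled binary-search while loop; '(lo + hi) // 2' is Nat division (operands
-- non-negative, so exact), and 'keys[mid]' is getD (exact: lo ≤ mid < hi ≤ len(keys))
def pvBisect (keys : List (Nat × String)) (key : Nat × String) (lo hi : Nat) : Nat :=
  if h : lo < hi then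
    let mid := (lo + hi) / 2
    if pvTupLt (keys.getD mid ((0 : Nat), "")) key then pvBisect keys key (mid + 1) hi
    else pvBisect keys key lo mid
  else lo
termination_by hi - lo
decreasing_by all_goals omega

-- B's single pass: a parallel sorted key list gives dedup (identical key) and position
-- ('keys[lo]' is getD, exact: guarded by lo < len(keys))
def pvBLoop : List String → List (Nat × String) → List String → List String
  | [], _, result => result
  | raw :: rest, keys, result =>
    match pvClean raw with
    | none => pvBLoop rest keys result
    | some command =>
      let lowered := PySem.Str.lower command
      let key := (pvPrioB pvMarkers 0 lowered, lowered)
      let lo := pvBisect keys key 0 keys.length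
      if decide (lo < keys.length) && (keys.getD lo ((0 : Nat), "") == key) then
        pvBLoop rest keys result
      else
        pvBLoop rest (PySem.List.insert keys (lo : Int) key) (PySem.List.insert result (lo : Int) command)

def normalize_link_commands_py_alt (commands : List String) : List String :=
  pvBLoop commands [] []

-- ===== PRECONDITION & SPEC =====
def Spec_normalize_link_commands_py (commands : List String) (out : List String) : Prop := out = normalize_link_commands_py_alt commands
instance (commands : List String) (out : List String) : Decidable (Spec_normalize_link_commands_py commands out) := by unfold Spec_normalize_link_commands_py; infer_instance

-- ===== CLAIM (what is proved, stated in full; the proofs are below) =====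
def Claim_equal_normalize_link_commands_py : Prop := ∀ (commands : List String), Dom_normalize_link_commands_py commands → Spec_normalize_link_commands_py commands (normalize_link_commands_py commands)

-- ===== LEMMAS AND PROOFS =====

-- the combined lexicographic key A's tuple sort realizes
def pvKey (c : String) : Lex (Nat × String) :=
  toLex (pvPrio (PySem.Str.lower c), PySem.Str.lower c)

theorem pvBoolEq (p q : Nat) (s t : String) :
    (decide (p < q) || (!decide (q < p) && decide (s < t)))
      = decide (toLex (p, s) < toLex (q, t)) := by
  by_cases h1 : p < q
  · simp [h1, Prod.Lex.toLex_lt_toLex, Nat.lt_asymm h1]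
  · by_cases h2 : q < p
    · have hne : p ≠ q := by omega
      simp [h1, h2, Prod.Lex.toLex_lt_toLex, hne]
    · have he : p = q := by omega
      subst he
      simp [Prod.Lex.toLex_lt_toLex]

theorem sorted2_eq_sorted_key (dd : List String) :
    PySem.List.sorted2 dd (fun c => pvPrio (PySem.Str.lower c)) (fun c => PySem.Str.lower c)
      = PySem.List.sorted dd pvKey := by
  simp only [PySem.List.sorted2, PySem.List.sorted, if_neg (by decide : ¬ (false = true))]
  congr 1
  funext acc x
  congr 1
  funext a b
  exact pvBoolEq _ _ _ _

-- B's for-loop priority equals A's findIdx? priority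
theorem pvPrioB_eq (s : String) : pvPrioB pvMarkers 0 s = pvPrio s := by
  simp only [pvPrioB, pvPrio, pvMarkers, List.findIdx?_cons, List.findIdx?_nil]
  split_ifs <;> simp

-- tuple-< as the Lex order
theorem pvTupLt_eq (a b : Nat × String) : pvTupLt a b = decide (toLex a < toLex b) := by
  obtain ⟨p, s⟩ := a; obtain ⟨q, t⟩ := b
  unfold pvTupLt
  by_cases h1 : p < q
  · simp [Prod.Lex.toLex_lt_toLex, h1, Bool.beq_eq_decide_eq]
  · by_cases h2 : p = q
    · subst h2; simp [Prod.Lex.toLex_lt_toLex]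
    · simp [h1, h2, Prod.Lex.toLex_lt_toLex]

-- the key of a command, as B computes it
def pvKeyF (x : String) : Nat × String :=
  (pvPrioB pvMarkers 0 (PySem.Str.lower x), PySem.Str.lower x)

theorem pvKeyF_toLex (x : String) : toLex (pvKeyF x) = pvKey x := by
  unfold pvKeyF pvKey; rw [pvPrioB_eq]

theorem pvCond_eq (x : String) (k : Nat × String) :
    pvTupLt (pvKeyF x) k = decide (pvKey x < toLex k) := by
  rw [pvTupLt_eq, pvKeyF_toLex]

-- the scanned index pvBisect computes: length of the prefix of keys < key
def pvScan (key : Nat × String) : List (Nat × String) → Nat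
  | [] => 0
  | k :: ks => if pvTupLt k key then pvScan key ks + 1 else 0

theorem pvScan_le (key : Nat × String) (ks : List (Nat × String)) : pvScan key ks ≤ ks.length := by
  induction ks with
  | nil => simp [pvScan]
  | cons k t ih => simp only [pvScan, List.length_cons]; split <;> omega

-- abstract sorted insertion (take/cons/drop at the scanned index, computed structurally)
def pvInsF {α : Type} (f : α → Nat × String) (c : α) (key : Nat × String) : List α → List α
  | [] => [c]
  | x :: xs => if pvTupLt (f x) key then x :: pvInsF f c key xs else c :: x :: xs

theorem pvTakeDrop {α : Type} (f : α → Nat × String) (c : α) (key : Nat × String) (xs : List α) :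
    xs.take (pvScan key (xs.map f)) ++ c :: xs.drop (pvScan key (xs.map f)) = pvInsF f c key xs := by
  induction xs with
  | nil => simp [pvScan, pvInsF]
  | cons x t ih =>
    simp only [List.map_cons, pvScan, pvInsF]
    split
    · simpa using ih
    · simp

-- B's list.insert at the scanned index is exactly the structural sorted insertion
theorem pvIns_eq {α : Type} (f : α → Nat × String) (c : α) (key : Nat × String) (xs : List α) :
    PySem.List.insert xs ((pvScan key (xs.map f) : Nat) : Int) c = pvInsF f c key xs := by
  rw [PySem.List.insert_natCast xs _ c (by simpa using pvScan_le key (xs.map f))]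
  exact pvTakeDrop f c key xs

theorem pvInsF_map (c : String) (key : Nat × String) (h : pvKeyF c = key) (xs : List String) :
    (pvInsF pvKeyF c key xs).map pvKeyF = pvInsF id key key (xs.map pvKeyF) := by
  induction xs with
  | nil => simp [pvInsF, h]
  | cons x t ih =>
    simp only [pvInsF, List.map_cons, id]
    split <;> simp [h, ih]

theorem pvInsF_perm {α : Type} (f : α → Nat × String) (c : α) (key : Nat × String) (xs : List α) :
    (pvInsF f c key xs).Perm (c :: xs) := by
  induction xs with
  | nil => simp [pvInsF]
  | cons x t ih =>
    simp only [pvInsF]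
    split
    · exact (ih.cons x).trans (List.Perm.swap c x t)
    · exact List.Perm.refl _

theorem pvInsF_pairwise (c : String) (key : Nat × String) (xs : List String)
    (hkey : pvKey c = toLex key)
    (hsorted : xs.Pairwise (fun a b => pvKey a < pvKey b))
    (hne : ∀ x ∈ xs, pvKey x ≠ toLex key) :
    (pvInsF pvKeyF c key xs).Pairwise (fun a b => pvKey a < pvKey b) := by
  induction xs with
  | nil => simp [pvInsF]
  | cons x t ih =>
    simp only [pvInsF, pvCond_eq]
    rw [List.pairwise_cons] at hsorted
    split
    · rename_i h
      rw [decide_eq_true_iff] at h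
      refine List.Pairwise.cons ?_ (ih hsorted.2 (fun y hy => hne y (by simp [hy])))
      intro y hy
      rcases List.mem_cons.mp ((pvInsF_perm pvKeyF c key t).mem_iff.mp hy) with hy | hy
      · subst hy; rw [hkey]; exact h
      · exact hsorted.1 y hy
    · rename_i h
      rw [decide_eq_true_iff] at h
      have hx : toLex key < pvKey x :=
        lt_of_le_of_ne (not_lt.mp h) (fun he => hne x (by simp) he.symm)
      refine List.Pairwise.cons ?_ (List.Pairwise.cons hsorted.1 hsorted.2)
      intro y hy
      rw [hkey]
      rcases List.mem_cons.mp hy with hy | hy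
      · subst hy; exact hx
      · exact hx.trans (hsorted.1 y hy)

theorem pvScan_prefix (key : Nat × String) :
    ∀ (ks : List (Nat × String)) (j : Nat), j < pvScan key ks →
      pvTupLt (ks.getD j ((0 : Nat), "")) key = true := by
  intro ks
  induction ks with
  | nil => intro j h; simp [pvScan] at h
  | cons k t ih =>
    intro j h
    simp only [pvScan] at h
    split at h
    · cases j with
      | zero => simpa [List.getD_cons_zero] using ‹_›
      | succ j => simpa [List.getD_cons_succ] using ih j (by omega)
    · omega

theorem pvScan_stop (key : Nat × String) :
    ∀ ks : List (Nat × String), pvScan key ks < ks.length →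
      pvTupLt (ks.getD (pvScan key ks) ((0 : Nat), "")) key = false := by
  intro ks
  induction ks with
  | nil => intro h; simp [pvScan] at h
  | cons k t ih =>
    intro h
    simp only [pvScan] at h ⊢
    split
    · rename_i hk
      simpa [List.getD_cons_succ, hk] using ih (by simp [pvScan, hk] at h; omega)
    · rename_i hk
      rw [Bool.not_eq_true] at hk
      simpa [List.getD_cons_zero] using hk

theorem pvScan_notP (key : Nat × String) (ks : List (Nat × String))
    (hsort : ks.Pairwise (fun a b => toLex a < toLex b))
    (j : Nat) (h1 : pvScan key ks ≤ j) (h2 : j < ks.length) :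
    pvTupLt (ks.getD j ((0 : Nat), "")) key = false := by
  have hi0 : pvScan key ks < ks.length := Nat.lt_of_le_of_lt h1 h2
  have hstop := pvScan_stop key ks hi0
  rcases eq_or_lt_of_le h1 with he | hlt
  · rw [← he]; exact hstop
  · rw [List.getD_eq_getElem _ _ h2, pvTupLt_eq]
    simp only [decide_eq_false_iff_not]
    intro hlt2
    have hij := (List.pairwise_iff_getElem.mp hsort) _ _ hi0 h2 hlt
    rw [List.getD_eq_getElem _ _ hi0, pvTupLt_eq] at hstop
    simp only [decide_eq_false_iff_not] at hstop
    exact hstop (hij.trans hlt2)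

-- on a sorted key list the binary search lands exactly at the scanned index
theorem pvBisect_eq (ks : List (Nat × String)) (key : Nat × String)
    (hsort : ks.Pairwise (fun a b => toLex a < toLex b)) :
    ∀ (d lo hi : Nat), hi - lo ≤ d → lo ≤ pvScan key ks → pvScan key ks ≤ hi →
      hi ≤ ks.length → pvBisect ks key lo hi = pvScan key ks := by
  intro d
  induction d with
  | zero =>
    intro lo hi hd hlo hhi _
    rw [pvBisect, dif_neg (by omega)]
    omega
  | succ d ih =>
    intro lo hi hd hlo hhi hlen
    by_cases hlh : lo < hi
    · rw [pvBisect, dif_pos hlh]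
      by_cases hm : pvTupLt (ks.getD ((lo + hi) / 2) ((0 : Nat), "")) key = true
      · rw [if_pos hm]
        have hmlt : (lo + hi) / 2 < pvScan key ks := by
          by_contra hge
          rw [Nat.not_lt] at hge
          have hf := pvScan_notP key ks hsort _ hge (by omega)
          rw [hf] at hm
          exact Bool.false_ne_true hm
        exact ih ((lo + hi) / 2 + 1) hi (by omega) (by omega) hhi hlen
      · rw [if_neg hm]
        rw [Bool.not_eq_true] at hm
        have hge : pvScan key ks ≤ (lo + hi) / 2 := by
          by_contra hlt
          rw [Nat.not_le] at hlt
          have hf := pvScan_prefix key ks _ hlt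
          rw [hm] at hf
          exact Bool.false_ne_true hf
        exact ih lo ((lo + hi) / 2) (by omega) hlo hge (by omega)
    · rw [pvBisect, dif_neg hlh]
      omega

-- B's duplicate test (identical key at the search position) is exactly key membership
theorem pvDup_iff (ks : List (Nat × String)) (key : Nat × String)
    (hsort : ks.Pairwise (fun a b => toLex a < toLex b)) :
    (decide (pvScan key ks < ks.length) && (ks.getD (pvScan key ks) ((0 : Nat), "") == key)) = true
      ↔ key ∈ ks := by
  constructor
  · intro h
    rw [Bool.and_eq_true, decide_eq_true_iff, beq_iff_eq] at h
    obtain ⟨h1, h2⟩ := h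
    rw [List.getD_eq_getElem _ _ h1] at h2
    exact h2 ▸ List.getElem_mem h1
  · intro hmem
    obtain ⟨j, hj, hjk⟩ := List.mem_iff_getElem.mp hmem
    have hge : pvScan key ks ≤ j := by
      by_contra hlt
      rw [Nat.not_le] at hlt
      have := pvScan_prefix key ks j hlt
      rw [List.getD_eq_getElem _ _ hj, hjk, pvTupLt_eq] at this
      simp at this
    have hi0 : pvScan key ks < ks.length := Nat.lt_of_le_of_lt hge hj
    have heq : pvScan key ks = j := by
      rcases eq_or_lt_of_le hge with he | hlt
      · exact he
      · exfalso
        have hij := (List.pairwise_iff_getElem.mp hsort) _ _ hi0 hj hlt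
        have hstop := pvScan_stop key ks hi0
        rw [List.getD_eq_getElem _ _ hi0, pvTupLt_eq] at hstop
        simp only [decide_eq_false_iff_not] at hstop
        rw [hjk] at hij
        exact hstop hij
    rw [Bool.and_eq_true, decide_eq_true_iff, beq_iff_eq, List.getD_eq_getElem _ _ hi0]
    exact ⟨hi0, by simp [heq, hjk]⟩

-- joint loop invariant: B's result is the key-sorted permutation of A's accumulator,
-- B's key list is the result's key image, and A's `seen` holds exactly those lowercase forms
theorem pvJoint (cs : List String) :
    ∀ (seen : PySem.Set String) (dd : List String) (keys : List (Nat × String)) (res : List String),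
      res.Perm dd →
      res.Pairwise (fun a b => pvKey a < pvKey b) →
      (∀ s, s ∈ seen ↔ ∃ x ∈ res, PySem.Str.lower x = s) →
      keys = res.map pvKeyF →
      (pvBLoop cs keys res).Perm (pvDedupLoop cs seen dd)
        ∧ (pvBLoop cs keys res).Pairwise (fun a b => pvKey a < pvKey b) := by
  induction cs with
  | nil =>
    intro seen dd keys res hp hs _ _
    exact ⟨by simpa [pvBLoop, pvDedupLoop] using hp, by simpa [pvBLoop] using hs⟩
  | cons raw rest ih =>
    intro seen dd keys res hp hs hiff hkeys
    by_cases hc : PySem.Str.join " " (PySem.Str.split₀ (PySem.Str.strip raw)) = ""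
    · rw [show pvDedupLoop (raw :: rest) seen dd = pvDedupLoop rest seen dd by
            simp [pvDedupLoop, hc],
          show pvBLoop (raw :: rest) keys res = pvBLoop rest keys res by
            simp [pvBLoop, pvClean, hc]]
      exact ih seen dd keys res hp hs hiff hkeys
    · by_cases ht : pvToken (PySem.Str.join " " (PySem.Str.split₀ (PySem.Str.strip raw))) = "/clear"
          ∨ pvToken (PySem.Str.join " " (PySem.Str.split₀ (PySem.Str.strip raw))) = "/model"
      · rw [show pvDedupLoop (raw :: rest) seen dd = pvDedupLoop rest seen dd by
              simp [pvDedupLoop, hc, ht],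
            show pvBLoop (raw :: rest) keys res = pvBLoop rest keys res by
              simp [pvBLoop, pvClean, hc, ht]]
        exact ih seen dd keys res hp hs hiff hkeys
      · have hmemkey :
            (pvPrioB pvMarkers 0 (PySem.Str.lower (PySem.Str.join " " (PySem.Str.split₀ (PySem.Str.strip raw)))),
             PySem.Str.lower (PySem.Str.join " " (PySem.Str.split₀ (PySem.Str.strip raw)))) ∈ keys
              ↔ ∃ x ∈ res, PySem.Str.lower x
                  = PySem.Str.lower (PySem.Str.join " " (PySem.Str.split₀ (PySem.Str.strip raw))) := by
          rw [hkeys, List.mem_map]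
          constructor
          · rintro ⟨x, hx, he⟩
            exact ⟨x, hx, congrArg Prod.snd he⟩
          · rintro ⟨x, hx, he⟩
            exact ⟨x, hx, by simp [pvKeyF, he]⟩
        have hsort : keys.Pairwise (fun a b : Nat × String => toLex a < toLex b) := by
          rw [hkeys, List.pairwise_map]
          exact hs.imp (fun h => by rw [pvKeyF_toLex, pvKeyF_toLex]; exact h)
        have hb : pvBisect keys
            (pvPrioB pvMarkers 0 (PySem.Str.lower (PySem.Str.join " " (PySem.Str.split₀ (PySem.Str.strip raw)))),
             PySem.Str.lower (PySem.Str.join " " (PySem.Str.split₀ (PySem.Str.strip raw)))) 0 keys.length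
            = pvScan (pvPrioB pvMarkers 0 (PySem.Str.lower (PySem.Str.join " " (PySem.Str.split₀ (PySem.Str.strip raw)))),
             PySem.Str.lower (PySem.Str.join " " (PySem.Str.split₀ (PySem.Str.strip raw)))) keys :=
          pvBisect_eq keys _ hsort keys.length 0 keys.length (by omega) (Nat.zero_le _)
            (pvScan_le _ _) le_rfl
        by_cases hsn : ∃ x ∈ res,
            PySem.Str.lower x = PySem.Str.lower (PySem.Str.join " " (PySem.Str.split₀ (PySem.Str.strip raw)))
        · have hseen : PySem.Str.lower (PySem.Str.join " " (PySem.Str.split₀ (PySem.Str.strip raw))) ∈ seen :=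
            (hiff _).mpr hsn
          have hdup := (pvDup_iff keys _ hsort).mpr (hmemkey.mpr hsn)
          simp only [List.getD_eq_getElem?_getD] at hdup
          rw [show pvDedupLoop (raw :: rest) seen dd = pvDedupLoop rest seen dd by
                simp [pvDedupLoop, hc, ht, hseen],
              show pvBLoop (raw :: rest) keys res = pvBLoop rest keys res by
                simp [pvBLoop, pvClean, hc, ht, hb, hdup]]
          exact ih seen dd keys res hp hs hiff hkeys
        · have hseen : PySem.Str.lower (PySem.Str.join " " (PySem.Str.split₀ (PySem.Str.strip raw))) ∉ seen :=
            fun hin => hsn ((hiff _).mp hin)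
          have hndup : ¬ ((decide (pvScan (pvPrioB pvMarkers 0 (PySem.Str.lower (PySem.Str.join " " (PySem.Str.split₀ (PySem.Str.strip raw)))),
             PySem.Str.lower (PySem.Str.join " " (PySem.Str.split₀ (PySem.Str.strip raw)))) keys < keys.length) &&
              (keys.getD (pvScan (pvPrioB pvMarkers 0 (PySem.Str.lower (PySem.Str.join " " (PySem.Str.split₀ (PySem.Str.strip raw)))),
             PySem.Str.lower (PySem.Str.join " " (PySem.Str.split₀ (PySem.Str.strip raw)))) keys) ((0 : Nat), "")
                == (pvPrioB pvMarkers 0 (PySem.Str.lower (PySem.Str.join " " (PySem.Str.split₀ (PySem.Str.strip raw)))),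
             PySem.Str.lower (PySem.Str.join " " (PySem.Str.split₀ (PySem.Str.strip raw)))))) = true) :=
            fun h => hsn (hmemkey.mp ((pvDup_iff keys _ hsort).mp h))
          rw [Bool.not_eq_true] at hndup
          simp only [List.getD_eq_getElem?_getD] at hndup
          rw [show pvDedupLoop (raw :: rest) seen dd
                = pvDedupLoop rest
                    (PySem.Set.add seen (PySem.Str.lower (PySem.Str.join " " (PySem.Str.split₀ (PySem.Str.strip raw)))))
                    (dd ++ [PySem.Str.join " " (PySem.Str.split₀ (PySem.Str.strip raw))]) by
                simp [pvDedupLoop, hc, ht, hseen],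
              show pvBLoop (raw :: rest) keys res
                = pvBLoop rest
                    (PySem.List.insert keys
                      ((pvScan (pvKeyF (PySem.Str.join " " (PySem.Str.split₀ (PySem.Str.strip raw)))) keys : Nat) : Int)
                      (pvKeyF (PySem.Str.join " " (PySem.Str.split₀ (PySem.Str.strip raw)))))
                    (PySem.List.insert res
                      ((pvScan (pvKeyF (PySem.Str.join " " (PySem.Str.split₀ (PySem.Str.strip raw)))) keys : Nat) : Int)
                      (PySem.Str.join " " (PySem.Str.split₀ (PySem.Str.strip raw)))) by
                simp [pvBLoop, pvClean, pvKeyF, hc, ht, hb, hndup]]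
          have hne : ∀ x ∈ res, pvKey x
              ≠ toLex (pvKeyF (PySem.Str.join " " (PySem.Str.split₀ (PySem.Str.strip raw)))) := by
            intro x hx he
            have h2 : PySem.Str.lower x
                = PySem.Str.lower (PySem.Str.join " " (PySem.Str.split₀ (PySem.Str.strip raw))) :=
              congrArg (fun z => (ofLex z).2) he
            exact hsn ⟨x, hx, h2⟩
          rw [hkeys, pvIns_eq pvKeyF, show PySem.List.insert (res.map pvKeyF)
                ((pvScan (pvKeyF (PySem.Str.join " " (PySem.Str.split₀ (PySem.Str.strip raw)))) (res.map pvKeyF) : Nat) : Int)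
                (pvKeyF (PySem.Str.join " " (PySem.Str.split₀ (PySem.Str.strip raw))))
              = pvInsF id (pvKeyF (PySem.Str.join " " (PySem.Str.split₀ (PySem.Str.strip raw))))
                  (pvKeyF (PySem.Str.join " " (PySem.Str.split₀ (PySem.Str.strip raw)))) (res.map pvKeyF) by
              simpa using pvIns_eq (fun k : Nat × String => k)
                (pvKeyF (PySem.Str.join " " (PySem.Str.split₀ (PySem.Str.strip raw))))
                (pvKeyF (PySem.Str.join " " (PySem.Str.split₀ (PySem.Str.strip raw)))) (res.map pvKeyF)]
          apply ih
          · exact ((pvInsF_perm _ _ _ _).trans (hp.cons _)).trans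
              (List.perm_append_singleton _ dd).symm
          · exact pvInsF_pairwise _ _ _ (pvKeyF_toLex _).symm hs hne
          · intro s
            constructor
            · intro hin
              rcases (PySem.Set.mem_add _ _ _).mp hin with hin | hin
              · obtain ⟨x, hx, hxs⟩ := (hiff s).mp hin
                exact ⟨x, (pvInsF_perm _ _ _ _).mem_iff.mpr (List.mem_cons_of_mem _ hx), hxs⟩
              · exact ⟨PySem.Str.join " " (PySem.Str.split₀ (PySem.Str.strip raw)),
                  (pvInsF_perm _ _ _ _).mem_iff.mpr List.mem_cons_self, hin.symm⟩
            · rintro ⟨x, hx, hxs⟩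
              rcases List.mem_cons.mp ((pvInsF_perm _ _ _ _).mem_iff.mp hx) with hx | hx
              · subst hx; exact (PySem.Set.mem_add _ _ _).mpr (Or.inr hxs.symm)
              · exact (PySem.Set.mem_add _ _ _).mpr (Or.inl ((hiff s).mpr ⟨x, hx, hxs⟩))
          · exact (pvInsF_map _ _ rfl res).symm

-- ===== VERDICT (by name: the statement is the Claim_ definition above) =====
theorem normalize_link_commands_py_spec : Claim_equal_normalize_link_commands_py := by
  intro commands _
  unfold Spec_normalize_link_commands_py
  simp only [normalize_link_commands_py, normalize_link_commands_py_alt]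
  rw [sorted2_eq_sorted_key]
  obtain ⟨hperm, hpw⟩ := pvJoint commands PySem.Set.empty [] [] []
    (List.Perm.refl []) (by simp) (by simp [PySem.Set.empty]) (by simp)
  exact PySem.List.sorted_eq_of_perm_of_pairwise_lt _ _ pvKey hperm hpw
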